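-- pv_equiv track=rewrite | github.com/darklinden/file-sort | file-sort.py | num_string
-- ===== SOURCE A (Python) =====
-- def num_string(str):
--     num = "0123456789"
--     ret = ""
--     for i in range(len(str)):
--         o = str[i]
--         if num.find(o) != -1:
--             ret += o
--         else:
--             if len(ret) > 0:
--                 e = ret[len(ret) - 1]
--                 if num.find(e) != -1:
--                     ret += "."
--
--     if len(ret) == 0:
--         return "0"
--     return ret
-- ===== SOURCE B (Python) =====
-- def num_string(str):
--     digits = "0123456789"
--     ret = ""
--     i = 0
--     n = len(str)
--     while i < n:
--         d = str[i] in digits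
--         j = i
--         while j < n and (str[j] in digits) == d:
--             j += 1
--         if d:
--             ret += str[i:j]
--         elif ret:
--             ret += "."
--         i = j
--     return ret or "0"
-- ===== Notes on version B (the rewrite author's own statement) =====
-- stated objective: alternative
-- what changed: Replaced A's per-character state machine (which re-inspects ret's last character to decide whether to emit a dot) by a two-pointer run scanner: it splits the string into maximal digit/non-digit runs, appends a digit run as a slice and a single dot per non-digit run once ret is non-empty.
import Mathlib
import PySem

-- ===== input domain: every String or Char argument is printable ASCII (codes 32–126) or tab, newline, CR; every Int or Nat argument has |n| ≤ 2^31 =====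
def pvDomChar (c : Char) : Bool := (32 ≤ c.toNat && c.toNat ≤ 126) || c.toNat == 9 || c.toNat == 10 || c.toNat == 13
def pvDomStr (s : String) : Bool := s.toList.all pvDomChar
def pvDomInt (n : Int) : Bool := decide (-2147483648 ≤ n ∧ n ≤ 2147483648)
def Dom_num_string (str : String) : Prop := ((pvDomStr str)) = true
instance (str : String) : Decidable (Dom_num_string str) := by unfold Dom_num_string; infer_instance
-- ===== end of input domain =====

-- B replaces A's per-character last-char state machine by a two-pointer run scanner (alternative decomposition, same cost).


-- ===== PORT A =====
-- 'num.find(o) != -1' for a single character o is exactly membership of o in "0123456789"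
def aDig (o : Char) : Bool := "0123456789".toList.contains o

-- one iteration of A's 'for i in range(len(str))' loop body, state = ret
def aStep (ret : List Char) (o : Char) : List Char :=
  if aDig o then ret ++ [o]
  else
    -- 'if len(ret) > 0: e = ret[len(ret)-1]' : last element, present iff ret nonempty
    match ret.getLast? with
    | some e => if aDig e then ret ++ ['.'] else ret
    | none => ret

def num_string (str : String) : String :=
  let ret := str.toList.foldl aStep []
  if ret.length = 0 then "0" else String.ofList ret

-- ===== PORT B =====
def bDig (c : Char) : Bool := "0123456789".toList.contains c

-- inner 'while j < n and (str[j] in digits) == d' scan: (run taken, rest)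
def bSpan (d : Bool) : List Char → List Char × List Char
  | [] => ([], [])
  | c :: cs =>
    if bDig c = d then
      let p := bSpan d cs
      (c :: p.1, p.2)
    else ([], c :: cs)

theorem bSpan_snd_length_le (d : Bool) : ∀ l : List Char, (bSpan d l).2.length ≤ l.length := by
  intro l
  induction l with
  | nil => simp [bSpan]
  | cons c cs ih =>
    by_cases h : bDig c = d
    · simp [bSpan, h]; omega
    · simp [bSpan, h]

-- outer 'while i < n' loop: state = ret, remaining characters
def bGo (ret : List Char) (rest : List Char) : List Char :=
  match rest with
  | [] => ret
  | c :: cs =>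
    let d := bDig c
    let p := bSpan d (c :: cs)
    if d then bGo (ret ++ p.1) p.2
    else bGo (if ret.length ≠ 0 then ret ++ ['.'] else ret) p.2
  termination_by rest.length
  decreasing_by
    all_goals
      have := bSpan_snd_length_le (bDig c) cs
      simp [bSpan]
      omega

def num_string_alt (str : String) : String :=
  let ret := bGo [] str.toList
  if ret.length = 0 then "0" else String.ofList ret

-- ===== PRECONDITION & SPEC =====
def Spec_num_string (str : String) (out : String) : Prop := out = num_string_alt str
instance (str : String) (out : String) : Decidable (Spec_num_string str out) := by unfold Spec_num_string; infer_instance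

-- ===== CLAIM (what is proved, stated in full; the proofs are below) =====
def Claim_equal_num_string : Prop := ∀ (str : String), Dom_num_string str → Spec_num_string str (num_string str)

-- ===== LEMMAS AND PROOFS =====

theorem bSpan_append (d : Bool) : ∀ l : List Char, (bSpan d l).1 ++ (bSpan d l).2 = l := by
  intro l
  induction l with
  | nil => simp [bSpan]
  | cons c cs ih => by_cases h : bDig c = d <;> simp [bSpan, h, ih]

theorem bSpan_fst_mem (d : Bool) : ∀ l : List Char, ∀ c ∈ (bSpan d l).1, bDig c = d := by
  intro l
  induction l with
  | nil => simp [bSpan]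
  | cons c cs ih =>
    by_cases h : bDig c = d
    · simp only [bSpan, if_pos h]
      intro x hx
      rcases List.mem_cons.1 hx with h1 | h1
      · exact h1 ▸ h
      · exact ih x h1
    · simp [bSpan, h]

theorem bSpan_snd_head (d : Bool) :
    ∀ l : List Char, ∀ c cs, (bSpan d l).2 = c :: cs → bDig c ≠ d := by
  intro l
  induction l with
  | nil => simp [bSpan]
  | cons a as ih =>
    by_cases h : bDig a = d
    · simp only [bSpan, if_pos h]
      exact ih
    · simp only [bSpan, if_neg h]
      intro c cs hcc
      cases hcc
      exact h

-- digit characters pass straight through A's fold, appending themselves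
theorem foldl_aStep_digits (t r : List Char) (acc : List Char)
    (ht : ∀ c ∈ t, aDig c = true) :
    (t ++ r).foldl aStep acc = r.foldl aStep (acc ++ t) := by
  induction t generalizing acc with
  | nil => simp
  | cons c cs ih =>
    have hc : aDig c = true := ht c (List.mem_cons_self ..)
    simp only [List.cons_append, List.foldl_cons, aStep, if_pos hc]
    rw [ih (acc ++ [c]) (fun x hx => ht x (List.mem_cons_of_mem _ hx))]
    simp

-- non-digit characters leave A's state unchanged when it is empty or ends in a non-digit
theorem foldl_aStep_nondigits (t : List Char) (acc : List Char)
    (ht : ∀ c ∈ t, aDig c = false)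
    (hacc : acc = [] ∨ ∃ e, acc.getLast? = some e ∧ aDig e = false) :
    t.foldl aStep acc = acc := by
  induction t with
  | nil => rfl
  | cons c cs ih =>
    have hc : aDig c = false := ht c (List.mem_cons_self ..)
    have hstep : aStep acc c = acc := by
      rcases hacc with h | ⟨e, he, hde⟩
      · simp [aStep, hc, h]
      · simp [aStep, hc, he, hde]
    simp only [List.foldl_cons, hstep]
    exact ih (fun x hx => ht x (List.mem_cons_of_mem _ hx))

-- main lemma: A's fold equals B's run loop, under the invariant that ret is empty,
-- ends in a digit, or the rest starts with a digit
theorem main_lemma : ∀ n (l ret : List Char), l.length ≤ n →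
    (ret = [] ∨ (∃ e, ret.getLast? = some e ∧ aDig e = true) ∨
      (∀ c cs, l = c :: cs → aDig c = true)) →
    l.foldl aStep ret = bGo ret l := by
  intro n
  induction n with
  | zero =>
    intro l ret hl _
    have : l = [] := List.length_eq_zero_iff.1 (Nat.le_zero.1 hl)
    subst this; simp [bGo]
  | succ n ih =>
    intro l ret hl hinv
    match l with
    | [] => simp [bGo]
    | c :: cs =>
      have hsplit := bSpan_append (bDig c) (c :: cs)
      set p := bSpan (bDig c) (c :: cs) with hp
      have hp1 : p.1 = c :: (bSpan (bDig c) cs).1 := by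
        simp [hp, bSpan]
      have hp2 : p.2 = (bSpan (bDig c) cs).2 := by
        simp [hp, bSpan]
      have hlen2 : p.2.length ≤ cs.length := hp2 ▸ bSpan_snd_length_le (bDig c) cs
      have hlenn : p.2.length ≤ n := by
        simp only [List.length_cons] at hl; omega
      have hhead : ∀ x xs, p.2 = x :: xs → aDig x = true ∨ (bDig c = true ∧ aDig x = false) := by
        intro x xs hxx
        have := bSpan_snd_head (bDig c) (c :: cs) x xs (hp ▸ hxx)
        cases hbc : bDig c
        · left
          have : bDig x = true := by
            cases hbx : bDig x
            · exact absurd (hbx.trans hbc.symm) this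
            · rfl
          simpa [aDig, bDig] using this
        · right
          refine ⟨rfl, ?_⟩
          have : bDig x = false := by
            cases hbx : bDig x
            · rfl
            · exact absurd (hbx.trans hbc.symm) this
          simpa [aDig, bDig] using this
      cases hd : bDig c
      · -- non-digit run
        have hda : aDig c = false := by simpa [aDig, bDig] using hd
        have hmem : ∀ x ∈ p.1, aDig x = false := by
          intro x hx
          have := bSpan_fst_mem (bDig c) (c :: cs) x (hp ▸ hx)
          rw [hd] at this
          simpa [aDig, bDig] using this
        have hret : ret = [] ∨ ∃ e, ret.getLast? = some e ∧ aDig e = true := by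
          rcases hinv with h | h | h
          · exact Or.inl h
          · exact Or.inr h
          · exact absurd (h c cs rfl) (by simp [hda])
        have hinv' : ∀ x xs, p.2 = x :: xs → aDig x = true := by
          intro x xs hxx
          rcases hhead x xs hxx with h | ⟨hbc, _⟩
          · exact h
          · rw [hd] at hbc; exact absurd hbc (by simp)
        rcases hret with hre | ⟨e, he, hde⟩
        · -- ret empty: nothing emitted
          subst hre
          have hA : (c :: cs).foldl aStep [] = p.2.foldl aStep [] := by
            conv_lhs => rw [← hsplit]
            rw [List.foldl_append]
            rw [foldl_aStep_nondigits p.1 [] hmem (Or.inl rfl)]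
          rw [hA, ih p.2 [] hlenn (Or.inr (Or.inr hinv'))]
          rw [bGo]
          rw [hp, hd]
          simp
        · -- ret ends in a digit: one dot emitted
          have hA : (c :: cs).foldl aStep ret = p.2.foldl aStep (ret ++ ['.']) := by
            conv_lhs => rw [← hsplit]
            rw [List.foldl_append, hp1]
            simp only [List.foldl_cons]
            have hstep : aStep ret c = ret ++ ['.'] := by
              simp [aStep, hda, he, hde]
            rw [hstep]
            rw [foldl_aStep_nondigits (bSpan (bDig c) cs).1 (ret ++ ['.'])
              (fun x hx => hmem x (by rw [hp1]; exact List.mem_cons_of_mem _ hx))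
              (Or.inr ⟨'.', List.getLast?_concat, by decide⟩)]
          rw [hA, ih p.2 (ret ++ ['.']) hlenn (Or.inr (Or.inr hinv'))]
          rw [bGo]
          have hne : ret ≠ [] := by
            intro h; rw [h] at he; simp at he
          rw [hp, hd]
          simp [List.length_eq_zero_iff, hne]
      · -- digit run
        have hmem : ∀ x ∈ p.1, aDig x = true := by
          intro x hx
          have := bSpan_fst_mem (bDig c) (c :: cs) x (hp ▸ hx)
          rw [hd] at this
          simpa [aDig, bDig] using this
        have hA : (c :: cs).foldl aStep ret = p.2.foldl aStep (ret ++ p.1) := by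
          conv_lhs => rw [← hsplit]
          rw [List.foldl_append]
          rw [show p.1.foldl aStep ret = ([] : List Char).foldl aStep (ret ++ p.1) by
            have := foldl_aStep_digits p.1 [] ret hmem
            simpa using this]
          simp
        have hinv' : (ret ++ p.1) = [] ∨ (∃ e, (ret ++ p.1).getLast? = some e ∧ aDig e = true) ∨
            (∀ x xs, p.2 = x :: xs → aDig x = true) := by
          right; left
          have hne : p.1 ≠ [] := by rw [hp1]; simp
          refine ⟨p.1.getLast hne, ?_, ?_⟩
          · rw [List.getLast?_append_of_ne_nil ret hne]
            exact List.getLast?_eq_some_getLast hne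
          · exact hmem _ (List.getLast_mem hne)
        rw [hA, ih p.2 (ret ++ p.1) hlenn hinv']
        rw [bGo]
        rw [hp, hd]
        simp

-- ===== VERDICT (by name: the statement is the Claim_ definition above) =====
theorem num_string_spec : Claim_equal_num_string := by
  intro str _
  unfold Spec_num_string num_string num_string_alt
  rw [main_lemma str.toList.length str.toList [] le_rfl (Or.inl rfl)]
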